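-- pv_equiv track=rewrite | github.com/Abiney01/DS_Practice | arrays/sum_of_zeroes.py | sum_of_zeroes
-- ===== SOURCE A (Python) =====
-- def sum_of_zeroes(matrix,m,n):
--     total_coverage = 0
--     directions = [(-1,0),(1,0),(0,-1),(0,1)]
--     for i in range(m):
--         for j in range(n):
--             if matrix[i][j]==0:
--                 coverage = 0
--                 for dx, dy in directions:
--                     ni = i+dx
--                     nj = j+dy
--                     if 0 <= ni < m and 0 <= nj < n and matrix[ni][nj]==1:
--                         coverage+=1
--                 total_coverage+=coverage
--     return total_coverage
-- ===== SOURCE B (Python) =====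
-- def sum_of_zeroes(matrix, m, n):
--     # Count 0-1 orthogonal adjacencies: visit each horizontal/vertical edge once.
--     total = 0
--     for i in range(m):
--         for j in range(n):
--             a = matrix[i][j]
--             if j + 1 < n:
--                 b = matrix[i][j + 1]
--                 total += (a == 0 and b == 1) + (b == 0 and a == 1)
--             if i + 1 < m:
--                 c = matrix[i + 1][j]
--                 total += (a == 0 and c == 1) + (c == 0 and a == 1)
--     return total
-- ===== Notes on version B (the rewrite author's own statement) =====
-- stated objective: alternative
-- what changed: Instead of scanning all four neighbors of every zero cell, B counts each orthogonal 0-1 adjacency once by looking only at each cell's right and down neighbor and adding both orientations of the edge.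
import Mathlib
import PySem

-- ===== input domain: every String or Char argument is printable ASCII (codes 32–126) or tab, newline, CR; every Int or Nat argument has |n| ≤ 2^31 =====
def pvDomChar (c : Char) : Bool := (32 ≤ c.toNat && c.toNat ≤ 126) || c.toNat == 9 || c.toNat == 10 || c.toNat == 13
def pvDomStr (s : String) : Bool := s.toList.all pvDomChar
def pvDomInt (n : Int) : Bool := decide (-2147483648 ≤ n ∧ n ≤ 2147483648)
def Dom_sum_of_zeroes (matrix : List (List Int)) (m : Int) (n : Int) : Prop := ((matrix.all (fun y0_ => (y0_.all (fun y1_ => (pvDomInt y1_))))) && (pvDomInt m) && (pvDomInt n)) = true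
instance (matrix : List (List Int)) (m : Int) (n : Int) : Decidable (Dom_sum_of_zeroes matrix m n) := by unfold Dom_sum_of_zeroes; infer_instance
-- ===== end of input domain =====

-- B changes the decomposition: it counts each orthogonal 0-1 adjacency once (right/down edges,
-- both orientations) instead of scanning all four neighbors of every zero cell; same cost class.

-- ===== PORT A =====
def sum_of_zeroes (matrix : List (List Int)) (m : Int) (n : Int) : Int :=
  (PySem.List.pyRange 0 m 1).foldl (fun total_coverage i =>
    (PySem.List.pyRange 0 n 1).foldl (fun total_coverage j =>
      if PySem.List.pyGetD (PySem.List.pyGetD matrix i []) j 0 = 0 then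
        total_coverage +
          (([((-1 : Int), (0 : Int)), (1, 0), (0, -1), (0, 1)]).foldl (fun coverage d =>
            if 0 ≤ i + d.1 ∧ i + d.1 < m ∧ 0 ≤ j + d.2 ∧ j + d.2 < n ∧
               PySem.List.pyGetD (PySem.List.pyGetD matrix (i + d.1) []) (j + d.2) 0 = 1 then
              coverage + 1
            else coverage) 0)
      else total_coverage) total_coverage) 0

-- ===== PORT B =====
def sum_of_zeroes_alt (matrix : List (List Int)) (m : Int) (n : Int) : Int :=
  (PySem.List.pyRange 0 m 1).foldl (fun total i =>
    (PySem.List.pyRange 0 n 1).foldl (fun total j =>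
      let a := PySem.List.pyGetD (PySem.List.pyGetD matrix i []) j 0
      let t1 : Int :=
        if j + 1 < n then
          (if a = 0 ∧ PySem.List.pyGetD (PySem.List.pyGetD matrix i []) (j + 1) 0 = 1 then 1 else 0) +
          (if PySem.List.pyGetD (PySem.List.pyGetD matrix i []) (j + 1) 0 = 0 ∧ a = 1 then 1 else 0)
        else 0
      let t2 : Int :=
        if i + 1 < m then
          (if a = 0 ∧ PySem.List.pyGetD (PySem.List.pyGetD matrix (i + 1) []) j 0 = 1 then 1 else 0) +
          (if PySem.List.pyGetD (PySem.List.pyGetD matrix (i + 1) []) j 0 = 0 ∧ a = 1 then 1 else 0)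
        else 0
      total + t1 + t2) total) 0

-- ===== PRECONDITION & SPEC =====
-- Pre_ excludes exactly the inputs where Python raises IndexError: when both loops are entered
-- (0 < m and 0 < n) the first m rows must exist and each of them must have at least n entries.
def Pre_sum_of_zeroes (matrix : List (List Int)) (m : Int) (n : Int) : Prop :=
  0 < m → 0 < n → (m.toNat ≤ matrix.length ∧ ∀ row ∈ matrix.take m.toNat, n.toNat ≤ row.length)
instance (matrix : List (List Int)) (m : Int) (n : Int) : Decidable (Pre_sum_of_zeroes matrix m n) := by
  unfold Pre_sum_of_zeroes; infer_instance

def pvWitness_sum_of_zeroes : List (List Int) × Int × Int := ([[0, 1], [1, 0]], 2, 2)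

def Spec_sum_of_zeroes (matrix : List (List Int)) (m : Int) (n : Int) (out : Int) : Prop := out = sum_of_zeroes_alt matrix m n
instance (matrix : List (List Int)) (m : Int) (n : Int) (out : Int) : Decidable (Spec_sum_of_zeroes matrix m n out) := by unfold Spec_sum_of_zeroes; infer_instance

-- ===== CLAIM (what is proved, stated in full; the proofs are below) =====
def Claim_equal_sum_of_zeroes : Prop := ∀ (matrix : List (List Int)) (m : Int) (n : Int), Dom_sum_of_zeroes matrix m n → Pre_sum_of_zeroes matrix m n → Spec_sum_of_zeroes matrix m n (sum_of_zeroes matrix m n)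

-- ===== LEMMAS AND PROOFS =====

-- the matrix viewed as a total function (pyGetD's defaults), Nat indices
def gAt (matrix : List (List Int)) (i j : Nat) : Int := (matrix.getD i []).getD j 0

-- A's contribution of cell (i,j), in Nat-index form (fold over the 4 directions unrolled)
def cellA (g : Nat → Nat → Int) (M N i j : Nat) : Int :=
  if g i j = 0 then
    (if 1 ≤ i ∧ g (i - 1) j = 1 then (1 : Int) else 0) +
    (if i + 1 < M ∧ g (i + 1) j = 1 then 1 else 0) +
    (if 1 ≤ j ∧ g i (j - 1) = 1 then 1 else 0) +
    (if j + 1 < N ∧ g i (j + 1) = 1 then 1 else 0)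
  else 0

-- B's contribution of cell (i,j), in Nat-index form
def cellB (g : Nat → Nat → Int) (M N i j : Nat) : Int :=
  (if j + 1 < N then
     (if g i j = 0 ∧ g i (j + 1) = 1 then (1 : Int) else 0) +
     (if g i (j + 1) = 0 ∧ g i j = 1 then 1 else 0)
   else 0) +
  (if i + 1 < M then
     (if g i j = 0 ∧ g (i + 1) j = 1 then (1 : Int) else 0) +
     (if g (i + 1) j = 0 ∧ g i j = 1 then 1 else 0)
   else 0)

-- the four directed-edge indicator terms
def tU (g : Nat → Nat → Int) (i j : Nat) : Int := if 1 ≤ i ∧ g i j = 0 ∧ g (i - 1) j = 1 then 1 else 0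
def tD (g : Nat → Nat → Int) (M i j : Nat) : Int := if i + 1 < M ∧ g i j = 0 ∧ g (i + 1) j = 1 then 1 else 0
def tL (g : Nat → Nat → Int) (i j : Nat) : Int := if 1 ≤ j ∧ g i j = 0 ∧ g i (j - 1) = 1 then 1 else 0
def tR (g : Nat → Nat → Int) (N i j : Nat) : Int := if j + 1 < N ∧ g i j = 0 ∧ g i (j + 1) = 1 then 1 else 0
def tDs (g : Nat → Nat → Int) (M i j : Nat) : Int := if i + 1 < M ∧ g (i + 1) j = 0 ∧ g i j = 1 then 1 else 0
def tRs (g : Nat → Nat → Int) (N i j : Nat) : Int := if j + 1 < N ∧ g i (j + 1) = 0 ∧ g i j = 1 then 1 else 0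

lemma cellA_split (g : Nat → Nat → Int) (M N i j : Nat) :
    cellA g M N i j = tU g i j + tD g M i j + tL g i j + tR g N i j := by
  unfold cellA tU tD tL tR
  by_cases h : g i j = 0 <;> simp [h]

lemma cellB_split (g : Nat → Nat → Int) (M N i j : Nat) :
    cellB g M N i j = tDs g M i j + tD g M i j + tRs g N i j + tR g N i j := by
  unfold cellB tD tR tDs tRs
  by_cases hj : j + 1 < N <;> by_cases hi : i + 1 < M <;> simp [hj, hi] <;> ring

-- shifting a "look back" sum into a "look forward" sum
lemma shift_sum (M : Nat) (f : Nat → Int) :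
    ∑ i ∈ Finset.range M, (if 1 ≤ i then f (i - 1) else 0)
      = ∑ i ∈ Finset.range M, (if i + 1 < M then f i else 0) := by
  cases M with
  | zero => simp
  | succ K =>
    rw [Finset.sum_range_succ', Finset.sum_range_succ]
    simp only [Nat.le_add_left 1, if_true, Nat.add_sub_cancel, Nat.lt_irrefl, Nat.add_lt_add_iff_right]
    rw [Finset.sum_congr rfl (fun i hi => if_pos (Finset.mem_range.mp hi))]
    simp

lemma sum_tL_eq_sum_tRs (g : Nat → Nat → Int) (N i : Nat) :
    ∑ j ∈ Finset.range N, tL g i j = ∑ j ∈ Finset.range N, tRs g N i j := by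
  have h := shift_sum N (fun k => if g i (k + 1) = 0 ∧ g i k = 1 then (1 : Int) else 0)
  calc ∑ j ∈ Finset.range N, tL g i j
      = ∑ j ∈ Finset.range N, (if 1 ≤ j then (if g i (j - 1 + 1) = 0 ∧ g i (j - 1) = 1 then (1 : Int) else 0) else 0) := by
        refine Finset.sum_congr rfl (fun j _ => ?_)
        unfold tL
        by_cases hj : 1 ≤ j
        · rw [Nat.sub_add_cancel hj]; simp [hj]
        · simp [hj]
    _ = ∑ j ∈ Finset.range N, (if j + 1 < N then (if g i (j + 1) = 0 ∧ g i j = 1 then (1 : Int) else 0) else 0) := h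
    _ = ∑ j ∈ Finset.range N, tRs g N i j := by
        refine Finset.sum_congr rfl (fun j _ => ?_)
        unfold tRs
        by_cases hj : j + 1 < N <;> simp [hj]

lemma sum_tU_eq_sum_tDs (g : Nat → Nat → Int) (M j : Nat) :
    ∑ i ∈ Finset.range M, tU g i j = ∑ i ∈ Finset.range M, tDs g M i j := by
  have h := shift_sum M (fun k => if g (k + 1) j = 0 ∧ g k j = 1 then (1 : Int) else 0)
  calc ∑ i ∈ Finset.range M, tU g i j
      = ∑ i ∈ Finset.range M, (if 1 ≤ i then (if g (i - 1 + 1) j = 0 ∧ g (i - 1) j = 1 then (1 : Int) else 0) else 0) := by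
        refine Finset.sum_congr rfl (fun i _ => ?_)
        unfold tU
        by_cases hi : 1 ≤ i
        · rw [Nat.sub_add_cancel hi]; simp [hi]
        · simp [hi]
    _ = ∑ i ∈ Finset.range M, (if i + 1 < M then (if g (i + 1) j = 0 ∧ g i j = 1 then (1 : Int) else 0) else 0) := h
    _ = ∑ i ∈ Finset.range M, tDs g M i j := by
        refine Finset.sum_congr rfl (fun i _ => ?_)
        unfold tDs
        by_cases hi : i + 1 < M <;> simp [hi]

-- the combinatorial heart: A's sum equals B's sum, for any total grid function
lemma sum_cellA_eq_sum_cellB (g : Nat → Nat → Int) (M N : Nat) :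
    ∑ i ∈ Finset.range M, ∑ j ∈ Finset.range N, cellA g M N i j
      = ∑ i ∈ Finset.range M, ∑ j ∈ Finset.range N, cellB g M N i j := by
  simp only [cellA_split, cellB_split, Finset.sum_add_distrib]
  have hU : ∑ i ∈ Finset.range M, ∑ j ∈ Finset.range N, tU g i j
      = ∑ i ∈ Finset.range M, ∑ j ∈ Finset.range N, tDs g M i j := by
    rw [Finset.sum_comm (f := fun i j => tU g i j)]
    refine Eq.trans (Finset.sum_congr rfl (fun j _ => sum_tU_eq_sum_tDs g M j)) ?_
    exact Finset.sum_comm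
  have hL : ∑ i ∈ Finset.range M, ∑ j ∈ Finset.range N, tL g i j
      = ∑ i ∈ Finset.range M, ∑ j ∈ Finset.range N, tRs g N i j :=
    Finset.sum_congr rfl (fun i _ => sum_tL_eq_sum_tRs g N i)
  rw [hU, hL]

-- folding an accumulator-plus-cell body equals init + sum
lemma foldl_eq_sum_of_cell (l : List Nat) (F : Int → Nat → Int) (f : Nat → Int) (init : Int)
    (h : ∀ acc k, k ∈ l → F acc k = acc + f k) :
    l.foldl F init = init + (l.map f).sum := by
  induction l generalizing init with
  | nil => simp
  | cons x xs ih =>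
    simp only [List.foldl_cons, List.map_cons, List.sum_cons]
    rw [h init x (List.mem_cons_self),
        ih (init + f x) (fun acc k hk => h acc k (List.mem_cons_of_mem x hk))]
    ring

lemma map_range_sum (M : Nat) (f : Nat → Int) :
    ((List.range M).map f).sum = ∑ i ∈ Finset.range M, f i := by
  induction M with
  | zero => simp
  | succ K ih => rw [List.range_succ, Finset.sum_range_succ]; simp [ih]


lemma gAt_cast (matrix : List (List Int)) (i j : Nat) :
    PySem.List.pyGetD (PySem.List.pyGetD matrix (i : Int) []) (j : Int) 0 = gAt matrix i j := by
  simp [gAt]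


lemma ite_acc (c : Int) (P : Prop) [Decidable P] :
    (if P then c + 1 else c) = c + (if P then 1 else 0) := by split <;> simp

lemma dirU (matrix : List (List Int)) (m n : Int) (k j : Nat)
    (hm : ((m.toNat : Int)) = m) (hn : ((n.toNat : Int)) = n)
    (hkM : k < m.toNat) (hjN : j < n.toNat) :
    (if 0 ≤ (k : Int) + -1 ∧ (k : Int) + -1 < m ∧ 0 ≤ (j : Int) ∧ (j : Int) < n ∧
        PySem.List.pyGetD (PySem.List.pyGetD matrix ((k : Int) + -1) []) (j : Int) 0 = 1
     then (1 : Int) else 0)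
      = (if 1 ≤ k ∧ gAt matrix (k - 1) j = 1 then 1 else 0) := by
  by_cases hk1 : 1 ≤ k
  · rw [show ((k : Int) + -1) = (((k - 1 : Nat)) : Int) by omega, gAt_cast]
    refine if_congr ⟨fun h => ⟨hk1, h.2.2.2.2⟩, fun h => ⟨by omega, by omega, by omega, by omega, h.2⟩⟩ rfl rfl
  · have h0 : ¬(0 ≤ (k : Int) + -1) := by omega
    simp [h0, hk1]

lemma dirD (matrix : List (List Int)) (m n : Int) (k j : Nat)
    (hm : ((m.toNat : Int)) = m) (hn : ((n.toNat : Int)) = n)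
    (_hkM : k < m.toNat) (hjN : j < n.toNat) :
    (if 0 ≤ (k : Int) + 1 ∧ (k : Int) + 1 < m ∧ 0 ≤ (j : Int) ∧ (j : Int) < n ∧
        PySem.List.pyGetD (PySem.List.pyGetD matrix ((k : Int) + 1) []) (j : Int) 0 = 1
     then (1 : Int) else 0)
      = (if k + 1 < m.toNat ∧ gAt matrix (k + 1) j = 1 then 1 else 0) := by
  rw [show ((k : Int) + 1) = (((k + 1 : Nat)) : Int) by push_cast; ring, gAt_cast]
  refine if_congr ⟨fun h => ⟨by omega, h.2.2.2.2⟩, fun h => ⟨by omega, by omega, by omega, by omega, h.2⟩⟩ rfl rfl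

lemma dirL (matrix : List (List Int)) (m n : Int) (k j : Nat)
    (hm : ((m.toNat : Int)) = m) (hn : ((n.toNat : Int)) = n)
    (hkM : k < m.toNat) (hjN : j < n.toNat) :
    (if 0 ≤ (k : Int) ∧ (k : Int) < m ∧ 0 ≤ (j : Int) + -1 ∧ (j : Int) + -1 < n ∧
        PySem.List.pyGetD (PySem.List.pyGetD matrix (k : Int) []) ((j : Int) + -1) 0 = 1
     then (1 : Int) else 0)
      = (if 1 ≤ j ∧ gAt matrix k (j - 1) = 1 then 1 else 0) := by
  by_cases hj1 : 1 ≤ j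
  · rw [show ((j : Int) + -1) = (((j - 1 : Nat)) : Int) by omega, gAt_cast]
    refine if_congr ⟨fun h => ⟨hj1, h.2.2.2.2⟩, fun h => ⟨by omega, by omega, by omega, by omega, h.2⟩⟩ rfl rfl
  · have h0 : ¬(0 ≤ (j : Int) + -1) := by omega
    simp [h0, hj1]

lemma dirR (matrix : List (List Int)) (m n : Int) (k j : Nat)
    (hm : ((m.toNat : Int)) = m) (hn : ((n.toNat : Int)) = n)
    (hkM : k < m.toNat) (_hjN : j < n.toNat) :
    (if 0 ≤ (k : Int) ∧ (k : Int) < m ∧ 0 ≤ (j : Int) + 1 ∧ (j : Int) + 1 < n ∧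
        PySem.List.pyGetD (PySem.List.pyGetD matrix (k : Int) []) ((j : Int) + 1) 0 = 1
     then (1 : Int) else 0)
      = (if j + 1 < n.toNat ∧ gAt matrix k (j + 1) = 1 then 1 else 0) := by
  rw [show ((j : Int) + 1) = (((j + 1 : Nat)) : Int) by push_cast; ring, gAt_cast]
  refine if_congr ⟨fun h => ⟨by omega, h.2.2.2.2⟩, fun h => ⟨by omega, by omega, by omega, by omega, h.2⟩⟩ rfl rfl

lemma portA_eq_sum (matrix : List (List Int)) (m n : Int) :
    sum_of_zeroes matrix m n
      = ∑ i ∈ Finset.range m.toNat, ∑ j ∈ Finset.range n.toNat,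
          cellA (gAt matrix) m.toNat n.toNat i j := by
  unfold sum_of_zeroes
  rw [PySem.List.pyRange_one 0 m, PySem.List.pyRange_one 0 n]
  simp only [sub_zero, zero_add, List.foldl_map]
  rw [foldl_eq_sum_of_cell _ _ (fun i => ∑ j ∈ Finset.range n.toNat, cellA (gAt matrix) m.toNat n.toNat i j) 0 ?_]
  · rw [map_range_sum, zero_add]
  · intro acc k hk
    have hkM : k < m.toNat := List.mem_range.mp hk
    rw [foldl_eq_sum_of_cell _ _ (fun j => cellA (gAt matrix) m.toNat n.toNat k j) acc ?_]
    · rw [map_range_sum]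
    · intro acc2 j hj
      have hjN : j < n.toNat := List.mem_range.mp hj
      have hm : ((m.toNat : Int)) = m := by omega
      have hn : ((n.toNat : Int)) = n := by omega
      simp only [ite_acc, List.foldl, zero_add, add_zero]
      rw [gAt_cast, dirU matrix m n k j hm hn hkM hjN, dirD matrix m n k j hm hn hkM hjN,
          dirL matrix m n k j hm hn hkM hjN, dirR matrix m n k j hm hn hkM hjN]
      unfold cellA
      by_cases h0 : gAt matrix k j = 0 <;> simp [h0]

lemma portB_eq_sum (matrix : List (List Int)) (m n : Int) :
    sum_of_zeroes_alt matrix m n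
      = ∑ i ∈ Finset.range m.toNat, ∑ j ∈ Finset.range n.toNat,
          cellB (gAt matrix) m.toNat n.toNat i j := by
  unfold sum_of_zeroes_alt
  rw [PySem.List.pyRange_one 0 m, PySem.List.pyRange_one 0 n]
  simp only [sub_zero, zero_add, List.foldl_map]
  rw [foldl_eq_sum_of_cell _ _ (fun i => ∑ j ∈ Finset.range n.toNat, cellB (gAt matrix) m.toNat n.toNat i j) 0 ?_]
  · rw [map_range_sum, zero_add]
  · intro acc k hk
    have hkM : k < m.toNat := List.mem_range.mp hk
    rw [foldl_eq_sum_of_cell _ _ (fun j => cellB (gAt matrix) m.toNat n.toNat k j) acc ?_]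
    · rw [map_range_sum]
    · intro acc2 j hj
      have hjN : j < n.toNat := List.mem_range.mp hj
      have hm : ((m.toNat : Int)) = m := by omega
      have hn : ((n.toNat : Int)) = n := by omega
      rw [show ((j : Int) + 1) = (((j + 1 : Nat)) : Int) by push_cast; ring,
          show ((k : Int) + 1) = (((k + 1 : Nat)) : Int) by push_cast; ring]
      simp only [gAt_cast]
      simp only [show (((((j + 1 : Nat)) : Int)) < n) ↔ ((j + 1) < n.toNat) by omega,
          show (((((k + 1 : Nat)) : Int)) < m) ↔ ((k + 1) < m.toNat) by omega]
      unfold cellB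
      ring

-- ===== VERDICT (by name: the statement is the Claim_ definition above) =====
theorem sum_of_zeroes_spec : Claim_equal_sum_of_zeroes := by
  intro matrix m n _dom _pre
  unfold Spec_sum_of_zeroes
  rw [portA_eq_sum, portB_eq_sum, sum_cellA_eq_sum_cellB]
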